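-- pv_equiv track=rewrite | github.com/Pierre-Sassoulas/contributors-txt | contributors_txt/update_content.py | _fallback_insert_position
-- ===== SOURCE A (Python) =====
-- def _fallback_insert_position(lines: list[str]) -> int:
--     """Find insert position when no matched person entries exist."""
--     last_person_idx = None
--     for i, line in enumerate(lines):
--         if line.startswith("- "):
--             last_person_idx = i
--     if last_person_idx is not None:
--         return _end_of_person_entry(lines, last_person_idx)
--     # No person entries at all, append before trailing whitespace
--     pos = len(lines)
--     while pos > 0 and lines[pos - 1].strip() == "":
--         pos -= 1
--     return pos
--
-- def _end_of_person_entry(lines: list[str], person_line_idx: int) -> int: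
--     """Return the line index after a person entry and its continuation lines."""
--     pos = person_line_idx + 1
--     while pos < len(lines) and lines[pos] and not lines[pos].startswith("- "):
--         pos += 1
--     return pos
-- ===== SOURCE B (Python) =====
-- def _fallback_insert_position(lines: list[str]) -> int:
--     """Find insert position when no matched person entries exist."""
--     # Single forward pass with an accumulator: pos is the answer so far,
--     # seen records whether any person entry has appeared.
--     pos = 0
--     seen = False
--     for i, line in enumerate(lines):
--         if line.startswith("- "):
--             seen = True
--             pos = i + 1
--         elif seen:
--             if pos == i and line:
--                 pos = i + 1
--         elif line.strip() != "":
--             pos = i + 1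
--     return pos
-- ===== Notes on version B (the rewrite author's own statement) =====
-- stated objective: simpler
-- what changed: Replaces A's three staged scans (full forward scan tracking the last '- ' index, a helper continuation scan, and a trailing-blank trim loop) with ONE forward pass keeping an accumulator (pos, seen) that is updated in place, so no second traversal or helper exists.
import Mathlib
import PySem

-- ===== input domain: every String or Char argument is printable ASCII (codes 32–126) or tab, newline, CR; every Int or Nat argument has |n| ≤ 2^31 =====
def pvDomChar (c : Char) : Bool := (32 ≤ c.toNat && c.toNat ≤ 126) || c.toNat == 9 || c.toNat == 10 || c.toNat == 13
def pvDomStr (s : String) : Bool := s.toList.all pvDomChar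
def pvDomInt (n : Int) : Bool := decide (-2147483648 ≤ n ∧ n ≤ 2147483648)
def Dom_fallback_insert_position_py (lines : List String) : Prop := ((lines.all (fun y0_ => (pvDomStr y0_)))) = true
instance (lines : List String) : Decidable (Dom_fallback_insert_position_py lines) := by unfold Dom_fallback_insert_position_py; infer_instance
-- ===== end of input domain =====

-- B replaces A's three staged scans (last-'- '-index scan, helper continuation scan,
-- trailing-blank trim) by one forward pass over enumerate with an accumulator (pos, seen)
-- (objective: simpler — one loop, no helper).

-- ===== PORT A =====
-- helper _end_of_person_entry: while pos < len(lines) and lines[pos] and not lines[pos].startswith("- ")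
-- (the guard pos < len keeps lines.getD in range, so getD is exact for Python's lines[pos])
def pvEndOfPersonEntry (lines : List String) (pos : Nat) : Nat :=
  if pos < lines.length then
    if lines.getD pos "" ≠ "" ∧ ¬ (PySem.Str.startswith (lines.getD pos "") "- " = true) then
      pvEndOfPersonEntry lines (pos + 1)
    else pos
  else pos
termination_by lines.length - pos

-- for i, line in enumerate(lines): if line.startswith("- "): last_person_idx = i
def pvLastIdxA (lines : List String) (i : Nat) (acc : Option Nat) : Option Nat :=
  match lines with
  | [] => acc
  | l :: rest => pvLastIdxA rest (i + 1) (if PySem.Str.startswith l "- " then some i else acc)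

-- while pos > 0 and lines[pos - 1].strip() == "": pos -= 1   (pos ≤ len, so getD is exact)
def pvTrimA (lines : List String) : Nat → Nat
  | 0 => 0
  | p + 1 => if PySem.Str.strip (lines.getD p "") = "" then pvTrimA lines p else p + 1

def fallback_insert_position_py (lines : List String) : Int :=
  match pvLastIdxA lines 0 none with
  | some i => (pvEndOfPersonEntry lines (i + 1) : Int)
  | none => (pvTrimA lines lines.length : Int)

-- ===== PORT B =====
-- the body of Source B's single for-loop, as a fold step over (pos, seen) and (i, line)
def pvStepB (st : Int × Bool) (p : Int × String) : Int × Bool :=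
  if PySem.Str.startswith p.2 "- " then (p.1 + 1, true)
  else if st.2 then (if st.1 = p.1 ∧ p.2 ≠ "" then (p.1 + 1, true) else st)
  else if PySem.Str.strip p.2 ≠ "" then (p.1 + 1, false) else st

def fallback_insert_position_py_alt (lines : List String) : Int :=
  ((PySem.List.enumerate lines 0).foldl pvStepB (0, false)).1

-- ===== PRECONDITION & SPEC =====
def Spec_fallback_insert_position_py (lines : List String) (out : Int) : Prop := out = fallback_insert_position_py_alt lines
instance (lines : List String) (out : Int) : Decidable (Spec_fallback_insert_position_py lines out) := by unfold Spec_fallback_insert_position_py; infer_instance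

-- ===== CLAIM (what is proved, stated in full; the proofs are below) =====
def Claim_equal_fallback_insert_position_py : Prop := ∀ (lines : List String), Dom_fallback_insert_position_py lines → Spec_fallback_insert_position_py lines (fallback_insert_position_py lines)

-- ===== LEMMAS AND PROOFS =====

-- common structural characterisation of "index of the last line starting with '- '"
def pvLastP : List String → Option Nat
  | [] => none
  | l :: rest =>
    match pvLastP rest with
    | some j => some (j + 1)
    | none => if PySem.Str.startswith l "- " then some 0 else none

theorem pvLastIdxA_eq (lines : List String) (k : Nat) (acc : Option Nat) :
    pvLastIdxA lines k acc =
      (match pvLastP lines with | some j => some (k + j) | none => acc) := by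
  induction lines generalizing k acc with
  | nil => rfl
  | cons l rest ih =>
    simp only [pvLastIdxA]
    rw [ih]
    cases h : pvLastP rest with
    | some j =>
      simp only [pvLastP, h, Option.some.injEq]
      omega
    | none =>
      simp only [pvLastP, h]
      by_cases hp : PySem.Chars.startswith l.toList ['-', ' '] = true <;> simp [hp]

theorem pvLastP_append (xs : List String) (x : String) :
    pvLastP (xs ++ [x]) =
      (if PySem.Str.startswith x "- " then some xs.length else pvLastP xs) := by
  induction xs with
  | nil => simp [pvLastP]
  | cons l rest ih =>
    simp only [List.cons_append, pvLastP, ih]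
    by_cases hp : PySem.Chars.startswith x.toList ['-', ' '] = true
    · simp [hp]
    · simp [hp]

theorem pvLastP_lt_length (xs : List String) (i : Nat) (h : pvLastP xs = some i) :
    i < xs.length := by
  induction xs generalizing i with
  | nil => simp [pvLastP] at h
  | cons l rest ih =>
    simp only [pvLastP] at h
    cases hr : pvLastP rest with
    | some j =>
      rw [hr] at h
      simp only [Option.some.injEq] at h
      have := ih j hr
      simp only [List.length_cons]
      omega
    | none =>
      rw [hr] at h
      by_cases hp : PySem.Chars.startswith l.toList ['-', ' '] = true
      · simp [hp] at h; simp [← h]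
      · simp [hp] at h

-- after the last "- " line, no line starts with "- "
theorem pvLastP_no_later (lines : List String) (i : Nat) (h : pvLastP lines = some i) :
    ∀ j, i < j → j < lines.length → ¬ (PySem.Str.startswith (lines.getD j "") "- " = true) := by
  induction lines using List.reverseRecOn with
  | nil => simp [pvLastP] at h
  | append_singleton xs x ih =>
    rw [pvLastP_append] at h
    by_cases hp : PySem.Chars.startswith x.toList ['-', ' '] = true
    · simp [hp] at h
      intro j hij hj
      simp only [List.length_append, List.length_cons, List.length_nil] at hj
      omega
    · simp [hp] at h
      intro j hij hj
      simp only [List.length_append, List.length_cons, List.length_nil] at hj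
      rcases Nat.lt_or_ge j xs.length with hlt | hge
      · rw [List.getD_append _ _ _ _ hlt]
        exact ih h j hij hlt
      · have hj' : j = xs.length := by omega
        subst hj'
        rw [List.getD_append_right _ _ _ _ (le_refl _)]
        simp only [Nat.sub_self, List.getD_cons_zero]
        simpa using hp

-- B's continuation value: the continuation scan as a standalone function, used only
-- to characterise the fold's accumulator
def pvContScan (lines : List String) (pos : Nat) : Nat :=
  if pos < lines.length then
    if lines.getD pos "" ≠ "" then pvContScan lines (pos + 1) else pos
  else pos
termination_by lines.length - pos

-- when no later line starts with "- ", A's continuation scan equals the plain scan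
theorem pvContScan_eqA (lines : List String) (pos : Nat)
    (h : ∀ j, pos ≤ j → j < lines.length → ¬ (PySem.Str.startswith (lines.getD j "") "- " = true)) :
    pvEndOfPersonEntry lines pos = pvContScan lines pos := by
  rw [pvEndOfPersonEntry, pvContScan]
  by_cases hlt : pos < lines.length
  · simp only [hlt, if_true]
    have hns := h pos (le_refl _) hlt
    by_cases hne : lines.getD pos "" ≠ ""
    · rw [if_pos ⟨hne, hns⟩, if_pos hne]
      exact pvContScan_eqA lines (pos + 1) (fun j hj => h j (by omega))
    · rw [if_neg (by tauto), if_neg hne]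
  · simp [hlt]
termination_by lines.length - pos

theorem pvContScan_append (xs : List String) (x : String) (p : Nat) (hp : p ≤ xs.length) :
    pvContScan (xs ++ [x]) p =
      (if pvContScan xs p = xs.length ∧ x ≠ "" then xs.length + 1 else pvContScan xs p) := by
  rcases Nat.lt_or_ge p xs.length with hlt | hge
  · have hR : pvContScan xs p = if xs.getD p "" ≠ "" then pvContScan xs (p + 1) else p := by
      conv_lhs => rw [pvContScan]
      rw [if_pos hlt]
    have hlt' : p < (xs ++ [x]).length := by simp; omega
    conv_lhs => rw [pvContScan]
    rw [if_pos hlt', List.getD_append _ _ _ _ hlt]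
    by_cases hne : xs.getD p "" ≠ ""
    · rw [if_pos hne, hR, if_pos hne]
      exact pvContScan_append xs x (p + 1) (by omega)
    · rw [if_neg hne, hR, if_neg hne, if_neg]
      rintro ⟨h1, _⟩; omega
  · have hpe : p = xs.length := by omega
    subst hpe
    have hxs : pvContScan xs xs.length = xs.length := by
      rw [pvContScan]; simp
    rw [hxs]
    conv_lhs => rw [pvContScan]
    have hlt' : xs.length < (xs ++ [x]).length := by simp
    rw [if_pos hlt', List.getD_append_right _ _ _ _ (le_refl _)]
    simp only [Nat.sub_self, List.getD_cons_zero]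
    by_cases hne : x ≠ ""
    · rw [if_pos hne, if_pos (⟨trivial, hne⟩ : True ∧ x ≠ ""), pvContScan]
      simp
    · rw [if_neg hne, if_neg (by tauto)]
termination_by xs.length - p

theorem pvTrimA_append (xs : List String) (x : String) (n : Nat) (hn : n ≤ xs.length) :
    pvTrimA (xs ++ [x]) n = pvTrimA xs n := by
  induction n with
  | zero => rfl
  | succ m ih =>
    simp only [pvTrimA]
    rw [List.getD_append _ _ _ _ (by omega), ih (by omega)]

-- the fold invariant: after processing all of xs, the state is characterised by pvLastP
theorem pvFoldB_char (xs : List String) :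
    (PySem.List.enumerate xs 0).foldl pvStepB (0, false) =
      (match pvLastP xs with
       | some i => ((pvContScan xs (i + 1) : Int), true)
       | none => ((pvTrimA xs xs.length : Int), false)) := by
  induction xs using List.reverseRecOn with
  | nil => rfl
  | append_singleton xs x ih =>
    rw [PySem.List.enumerate_append, List.foldl_append, ih,
        PySem.List.enumerate_cons, PySem.List.enumerate_nil, pvLastP_append]
    by_cases hp : PySem.Str.startswith x "- " = true
    · -- new last person entry at index xs.length
      rw [if_pos hp]
      have hcont : pvContScan (xs ++ [x]) (xs.length + 1) = xs.length + 1 := by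
        rw [pvContScan]; simp
      cases hl : pvLastP xs with
      | some i =>
        simp only [List.foldl_cons, List.foldl_nil, pvStepB, hp, if_true, hcont,
          Prod.mk.injEq]
        exact ⟨by push_cast; ring, trivial⟩
      | none =>
        simp only [List.foldl_cons, List.foldl_nil, pvStepB, hp, if_true, hcont,
          Prod.mk.injEq]
        exact ⟨by push_cast; ring, trivial⟩
    · rw [if_neg hp]
      cases hl : pvLastP xs with
      | some i =>
        have hi := pvLastP_lt_length xs i hl
        simp only [List.foldl_cons, List.foldl_nil, pvStepB]
        rw [if_neg hp, if_pos trivial]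
        rw [pvContScan_append xs x (i + 1) (by omega)]
        by_cases hc : pvContScan xs (i + 1) = xs.length ∧ x ≠ ""
        · have hcI : ((pvContScan xs (i + 1) : Int) = (0 : Int) + xs.length ∧ x ≠ "") :=
            ⟨by rw [hc.1]; ring, hc.2⟩
          rw [if_pos hcI, if_pos hc]
          simp only [Prod.mk.injEq]
          exact ⟨by push_cast; ring, trivial⟩
        · have hcI : ¬ ((pvContScan xs (i + 1) : Int) = (0 : Int) + xs.length ∧ x ≠ "") := by
            rintro ⟨h1, h2⟩
            exact hc ⟨by omega, h2⟩
          rw [if_neg hcI, if_neg hc]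
      | none =>
        simp only [List.foldl_cons, List.foldl_nil, pvStepB]
        rw [if_neg hp]
        simp only [Bool.false_eq_true, if_false]
        have hlen : (xs ++ [x]).length = xs.length + 1 := by simp
        rw [hlen]
        simp only [pvTrimA]
        rw [List.getD_append_right _ _ _ _ (le_refl _)]
        simp only [Nat.sub_self, List.getD_cons_zero]
        rw [pvTrimA_append xs x xs.length (le_refl _)]
        by_cases hs : PySem.Str.strip x = ""
        · rw [if_pos hs]
          simp only [hs, ne_eq, not_true_eq_false, if_false]
        · rw [if_neg hs]
          simp only [ne_eq, hs, not_false_eq_true, if_true, Prod.mk.injEq]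
          exact ⟨by push_cast; ring, trivial⟩

-- ===== VERDICT (by name: the statement is the Claim_ definition above) =====
theorem fallback_insert_position_py_spec : Claim_equal_fallback_insert_position_py := by
  intro lines _
  unfold Spec_fallback_insert_position_py fallback_insert_position_py fallback_insert_position_py_alt
  rw [pvLastIdxA_eq, pvFoldB_char]
  cases h : pvLastP lines with
  | none => simp
  | some i =>
    simp only [Nat.zero_add]
    congr 1
    exact pvContScan_eqA lines (i + 1)
      (fun j hj hjl => pvLastP_no_later lines i h j (by omega) hjl)
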